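-- pv_equiv track=rewrite | github.com/kumashi7/Evil-Geniuses-SDE-Intern-Assessment | game_analysis.py | first_double_enter_b_time
-- ===== SOURCE A (Python) =====
-- def first_double_enter_b_time(reach_b_timer):
--     min_time = 100000
--     for player in reach_b_timer:
--         for other_player in reach_b_timer:
--             if player == other_player:
--                 continue
--             for time in reach_b_timer[player]:
--                 start_time, end_time = time
--                 for other_time in reach_b_timer[other_player]:
--                     other_start_time, other_end_time = other_time
--                     if start_time < other_end_time or end_time > other_start_time:
--                         min_time = min(min_time, min(start_time, other_start_time))
--     return min_time
-- ===== SOURCE B (Python) =====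
-- def first_double_enter_b_time(reach_b_timer):
--     if len(reach_b_timer) < 2:
--         return 100000   # no cross-player pair can exist
--     # per-player aggregates: (player, max end, min start) for players with intervals
--     stats = []
--     for player in reach_b_timer:
--         times = reach_b_timer[player]
--         if times:
--             stats.append((player,
--                           max(t[1] for t in times),
--                           min(t[0] for t in times)))
--     ans = 100000
--     for player in reach_b_timer:
--         for time in reach_b_timer[player]:
--             s, e = time[0], time[1]
--             if any(q != player and (mx > s or mn < e) for (q, mx, mn) in stats):
--                 ans = min(ans, s)
--     return ans
-- ===== Notes on version B (the rewrite author's own statement) =====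
-- stated objective: faster
-- what changed: A scans all ordered cross-player interval pairs (O(T^2) interval-pair tests); B precomputes one (max end, min start) aggregate per player and then, in a single pass over the intervals, adds an interval's start iff some other player's aggregate certifies a valid partner, which is O(P*T).
import Mathlib
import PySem

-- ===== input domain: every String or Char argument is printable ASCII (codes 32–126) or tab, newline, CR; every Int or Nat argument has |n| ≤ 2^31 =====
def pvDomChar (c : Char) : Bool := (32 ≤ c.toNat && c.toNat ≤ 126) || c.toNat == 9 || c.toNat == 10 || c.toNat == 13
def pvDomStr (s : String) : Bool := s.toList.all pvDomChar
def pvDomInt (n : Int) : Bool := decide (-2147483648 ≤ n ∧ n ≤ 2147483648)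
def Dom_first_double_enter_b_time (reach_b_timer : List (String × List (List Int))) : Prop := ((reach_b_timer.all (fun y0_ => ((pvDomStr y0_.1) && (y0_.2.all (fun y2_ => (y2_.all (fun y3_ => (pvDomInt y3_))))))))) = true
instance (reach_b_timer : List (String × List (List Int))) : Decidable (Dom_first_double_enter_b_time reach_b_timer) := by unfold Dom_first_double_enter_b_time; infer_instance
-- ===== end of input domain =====

-- B replaces A's scan of all ordered cross-player interval pairs by one (max end, min start)
-- aggregate per player plus a single pass over the intervals (objective: faster).

-- ===== PORT A =====
def first_double_enter_b_time (reach_b_timer : List (String × List (List Int))) : Int :=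
  reach_b_timer.foldl (fun min_time player =>
    reach_b_timer.foldl (fun min_time other_player =>
      if player.1 == other_player.1 then min_time
      else
        player.2.foldl (fun min_time time =>
          match time with
          | [start_time, end_time] =>
            other_player.2.foldl (fun min_time other_time =>
              match other_time with
              | [other_start_time, other_end_time] =>
                if start_time < other_end_time ∨ end_time > other_start_time then
                  min min_time (min start_time other_start_time)
                else min_time
              | _ => min_time) min_time   -- tuple unpack of a non-pair raises in Python: outside Pre_
          | _ => min_time) min_time) min_time) 100000

-- ===== PORT B =====
-- per-player aggregate (player, max(t[1] for t in times), min(t[0] for t in times))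
def pvStatEntry (p : String × List (List Int)) : String × Int × Int :=
  (p.1,
   (PySem.List.max? (p.2.map (fun t => PySem.List.pyGetD t 1 0)) (fun x => x)).getD 0,
   (PySem.List.min? (p.2.map (fun t => PySem.List.pyGetD t 0 0)) (fun x => x)).getD 0)

def first_double_enter_b_time_alt (reach_b_timer : List (String × List (List Int))) : Int :=
  if reach_b_timer.length < 2 then 100000   -- no cross-player pair can exist
  else
  let stats := reach_b_timer.foldl (fun acc p =>
      if p.2.isEmpty then acc else acc ++ [pvStatEntry p]) []
  reach_b_timer.foldl (fun ans p =>
    p.2.foldl (fun ans time =>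
      let s := PySem.List.pyGetD time 0 0   -- time[0]; IndexError outside Pre_
      let e := PySem.List.pyGetD time 1 0   -- time[1]; IndexError outside Pre_
      if stats.any (fun q => q.1 != p.1 && (decide (q.2.1 > s) || decide (q.2.2 < e)))
      then min ans s else ans) ans) 100000

-- ===== PRECONDITION & SPEC =====
-- Pre_ is exactly where A returns: with at least two players, A's tuple unpacking raises
-- ValueError on any interval that is not a length-2 sequence; with fewer than two players the
-- intervals are never touched and A returns 100000 regardless of their shape.
def Pre_first_double_enter_b_time (reach_b_timer : List (String × List (List Int))) : Prop :=
  reach_b_timer.length < 2 ∨ ∀ p ∈ reach_b_timer, ∀ t ∈ p.2, t.length = 2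
instance (reach_b_timer : List (String × List (List Int))) : Decidable (Pre_first_double_enter_b_time reach_b_timer) := by unfold Pre_first_double_enter_b_time; infer_instance

def pvWitness_first_double_enter_b_time : (List (String × List (List Int))) :=
  [("a", [[1, 2]]), ("b", [[3, 4]])]

def Spec_first_double_enter_b_time (reach_b_timer : List (String × List (List Int))) (out : Int) : Prop := out = first_double_enter_b_time_alt reach_b_timer
instance (reach_b_timer : List (String × List (List Int))) (out : Int) : Decidable (Spec_first_double_enter_b_time reach_b_timer out) := by unfold Spec_first_double_enter_b_time; infer_instance

-- ===== CLAIM (what is proved, stated in full; the proofs are below) =====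
def Claim_equal_first_double_enter_b_time : Prop := ∀ (reach_b_timer : List (String × List (List Int))), Dom_first_double_enter_b_time reach_b_timer → Pre_first_double_enter_b_time reach_b_timer → Spec_first_double_enter_b_time reach_b_timer (first_double_enter_b_time reach_b_timer)

-- ===== LEMMAS AND PROOFS =====

theorem pv_foldl_min_dom (i : Int) (l1 l2 : List Int)
    (h12 : ∀ x ∈ l2, ∃ y ∈ l1, y ≤ x) (h21 : ∀ x ∈ l1, ∃ y ∈ l2, y ≤ x) :
    l1.foldl min i = l2.foldl min i := by
  have key : ∀ (a b : List Int), (∀ x ∈ b, ∃ y ∈ a, y ≤ x) → a.foldl min i ≤ b.foldl min i := by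
    intro a b h
    rcases PySem.List.foldl_min_mem b i with hb | hb
    · rw [hb]; exact (PySem.List.foldl_min_le a i).1
    · obtain ⟨y, hy, hyx⟩ := h _ hb
      exact le_trans ((PySem.List.foldl_min_le a i).2 y hy) hyx
  exact le_antisymm (key _ _ h12) (key _ _ h21)

def pvContrib (t t' : List Int) : List Int :=
  match t, t' with
  | [s, e], [os, oe] => if s < oe ∨ e > os then [min s os] else []
  | _, _ => []

def pvCandA (d : List (String × List (List Int))) : List Int :=
  d.flatMap (fun p => d.flatMap (fun q =>
    if p.1 = q.1 then []
    else p.2.flatMap (fun t => q.2.flatMap (fun t' => pvContrib t t'))))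

theorem pv_foldl_flat {α : Type} (g : α → List Int) (l : List α) (i : Int) :
    l.foldl (fun a x => (g x).foldl min a) i = (l.flatMap g).foldl min i := by
  induction l generalizing i with
  | nil => simp
  | cons x xs ih => simp [List.flatMap_cons, List.foldl_append, ih]

theorem pv_L1 (s e : Int) (ts' : List (List Int)) (a : Int) :
    ts'.foldl (fun m t' => match t' with
      | [os, oe] => if s < oe ∨ e > os then min m (min s os) else m
      | _ => m) a = (ts'.flatMap (fun t' => pvContrib [s, e] t')).foldl min a := by
  rw [← pv_foldl_flat]
  apply PySem.List.foldl_congr_mem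
  intro acc t' _
  rcases t' with _ | ⟨os, t'⟩
  · simp [pvContrib]
  rcases t' with _ | ⟨oe, t'⟩
  · simp [pvContrib]
  rcases t' with _ | ⟨z, t'⟩
  · by_cases h : s < oe ∨ e > os <;> simp [pvContrib, h]
  · simp [pvContrib]

theorem pv_L2 (ts ts' : List (List Int)) (a : Int) :
    ts.foldl (fun m t => match t with
      | [s, e] => ts'.foldl (fun m t' => match t' with
          | [os, oe] => if s < oe ∨ e > os then min m (min s os) else m
          | _ => m) m
      | _ => m) a = (ts.flatMap (fun t => ts'.flatMap (fun t' => pvContrib t t'))).foldl min a := by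
  rw [← pv_foldl_flat]
  apply PySem.List.foldl_congr_mem
  intro acc t _
  rcases t with _ | ⟨s, t⟩
  · rw [show List.flatMap (fun t' => pvContrib [] t') ts' = ([] : List Int) from
      List.flatMap_eq_nil_iff.mpr (fun _ _ => rfl)]; rfl
  rcases t with _ | ⟨e, t⟩
  · rw [show List.flatMap (fun t' => pvContrib [s] t') ts' = ([] : List Int) from
      List.flatMap_eq_nil_iff.mpr (fun _ _ => rfl)]; rfl
  rcases t with _ | ⟨z, t⟩
  · exact pv_L1 s e ts' acc
  · rw [show List.flatMap (fun t' => pvContrib (s :: e :: z :: t) t') ts' = ([] : List Int) from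
      List.flatMap_eq_nil_iff.mpr (fun _ _ => rfl)]; rfl

theorem pv_A_eq_candA (d : List (String × List (List Int))) :
    first_double_enter_b_time d = (pvCandA d).foldl min 100000 := by
  unfold first_double_enter_b_time pvCandA
  rw [← pv_foldl_flat]
  apply PySem.List.foldl_congr_mem
  intro acc p _
  rw [← pv_foldl_flat]
  apply PySem.List.foldl_congr_mem
  intro acc2 q _
  by_cases h : p.1 = q.1
  · simp [h]
  · simp only [h, beq_iff_eq, if_false]
    exact pv_L2 p.2 q.2 acc2

def pvStats (d : List (String × List (List Int))) : List (String × Int × Int) :=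
  d.foldl (fun acc p => if p.2.isEmpty then acc else acc ++ [pvStatEntry p]) []

def pvCandB (d : List (String × List (List Int))) : List Int :=
  d.flatMap (fun p => p.2.flatMap (fun t =>
    let s := PySem.List.pyGetD t 0 0
    let e := PySem.List.pyGetD t 1 0
    if (pvStats d).any (fun q => q.1 != p.1 && (decide (q.2.1 > s) || decide (q.2.2 < e)))
    then [s] else []))

theorem pv_stats_eq (d : List (String × List (List Int))) :
    pvStats d = (d.filter (fun p => !p.2.isEmpty)).map pvStatEntry := by
  unfold pvStats
  have h1 := PySem.List.foldl_congr_mem (l := d) (init := ([] : List (String × Int × Int)))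
      (f := fun acc p => if p.2.isEmpty then acc else acc ++ [pvStatEntry p])
      (g := fun acc p => if !p.2.isEmpty then acc ++ [pvStatEntry p] else acc)
      (fun acc p _ => by cases h : p.2.isEmpty <;> simp [h])
  rw [h1, PySem.List.foldl_append_if]
  rfl

theorem pv_B_eq_candB (d : List (String × List (List Int))) (hlen : ¬ d.length < 2) :
    first_double_enter_b_time_alt d = (pvCandB d).foldl min 100000 := by
  unfold first_double_enter_b_time_alt
  rw [if_neg hlen]
  show d.foldl _ 100000 = _
  unfold pvCandB
  rw [← pv_foldl_flat]
  apply PySem.List.foldl_congr_mem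
  intro acc p _
  rw [← pv_foldl_flat]
  apply PySem.List.foldl_congr_mem
  intro acc2 t _
  unfold pvStats
  dsimp only
  split_ifs with h <;> simp

theorem pv_lt_max (l : List Int) (h : l ≠ []) (s : Int) :
    s < (PySem.List.max? l (fun x => x)).getD 0 ↔ ∃ y ∈ l, s < y := by
  obtain ⟨x, t, rfl⟩ := List.exists_cons_of_ne_nil h
  rw [PySem.List.max?_id_cons]
  constructor
  · intro hs
    rcases PySem.List.foldl_max_mem t x with hm | hm
    · exact ⟨x, by simp, by simpa [hm] using hs⟩
    · exact ⟨_, by simp [hm], hs⟩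
  · rintro ⟨y, hy, hsy⟩
    rcases List.mem_cons.mp hy with rfl | hy
    · exact lt_of_lt_of_le hsy (PySem.List.le_foldl_max t y).1
    · exact lt_of_lt_of_le hsy ((PySem.List.le_foldl_max t x).2 y hy)

theorem pv_min_lt (l : List Int) (h : l ≠ []) (e : Int) :
    (PySem.List.min? l (fun x => x)).getD 0 < e ↔ ∃ y ∈ l, y < e := by
  obtain ⟨x, t, rfl⟩ := List.exists_cons_of_ne_nil h
  rw [PySem.List.min?_id_cons]
  constructor
  · intro hs
    rcases PySem.List.foldl_min_mem t x with hm | hm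
    · exact ⟨x, by simp, by simpa [hm] using hs⟩
    · exact ⟨_, by simp [hm], hs⟩
  · rintro ⟨y, hy, hsy⟩
    rcases List.mem_cons.mp hy with rfl | hy
    · exact lt_of_le_of_lt (PySem.List.foldl_min_le t y).1 hsy
    · exact lt_of_le_of_lt ((PySem.List.foldl_min_le t x).2 y hy) hsy

theorem pv_pair_of_len2 (t : List Int) (h : t.length = 2) : ∃ a b : Int, t = [a, b] := by
  rcases t with _ | ⟨a, _ | ⟨b, _ | _⟩⟩ <;> simp_all

theorem pv_check_iff (d : List (String × List (List Int)))
    (hPre : ∀ p ∈ d, ∀ t ∈ p.2, t.length = 2) (p1 : String) (s e : Int) :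
    ((pvStats d).any (fun q => q.1 != p1 && (decide (q.2.1 > s) || decide (q.2.2 < e))) = true)
    ↔ ∃ q ∈ d, q.1 ≠ p1 ∧ ∃ os oe : Int, [os, oe] ∈ q.2 ∧ (s < oe ∨ e > os) := by
  rw [pv_stats_eq, List.any_eq_true]
  constructor
  · rintro ⟨entry, hmem, hcond⟩
    rw [List.mem_map] at hmem
    obtain ⟨q, hqf, rfl⟩ := hmem
    rw [List.mem_filter] at hqf
    obtain ⟨hq, hne⟩ := hqf
    have hq2 : q.2 ≠ [] := by simpa [List.isEmpty_iff] using hne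
    simp only [pvStatEntry, Bool.and_eq_true, Bool.or_eq_true, bne_iff_ne,
      decide_eq_true_eq] at hcond
    obtain ⟨hne1, hagg⟩ := hcond
    refine ⟨q, hq, hne1, ?_⟩
    rcases hagg with hmax | hmin
    · rw [gt_iff_lt] at hmax
      obtain ⟨y, hy, hsy⟩ := (pv_lt_max _ (by simpa using hq2) s).mp hmax
      rw [List.mem_map] at hy
      obtain ⟨t', ht', rfl⟩ := hy
      obtain ⟨os, oe, rfl⟩ := pv_pair_of_len2 t' (hPre q hq t' ht')
      exact ⟨os, oe, ht', Or.inl hsy⟩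
    · obtain ⟨y, hy, hsy⟩ := (pv_min_lt _ (by simpa using hq2) e).mp hmin
      rw [List.mem_map] at hy
      obtain ⟨t', ht', rfl⟩ := hy
      obtain ⟨os, oe, rfl⟩ := pv_pair_of_len2 t' (hPre q hq t' ht')
      exact ⟨os, oe, ht', Or.inr hsy⟩
  · rintro ⟨q, hq, hne1, os, oe, ht', hc⟩
    have hq2 : q.2 ≠ [] := by rintro h0; rw [h0] at ht'; simp at ht'
    refine ⟨pvStatEntry q, List.mem_map.mpr ⟨q, List.mem_filter.mpr ⟨hq, by
      simpa [List.isEmpty_iff] using hq2⟩, rfl⟩, ?_⟩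
    simp only [pvStatEntry, Bool.and_eq_true, Bool.or_eq_true, bne_iff_ne, decide_eq_true_eq]
    refine ⟨hne1, ?_⟩
    rcases hc with hc | hc
    · exact Or.inl ((pv_lt_max _ (by simpa using hq2) s).mpr
        ⟨oe, List.mem_map.mpr ⟨[os, oe], ht', rfl⟩, hc⟩)
    · exact Or.inr ((pv_min_lt _ (by simpa using hq2) e).mpr
        ⟨os, List.mem_map.mpr ⟨[os, oe], ht', rfl⟩, hc⟩)

theorem pv_contrib_mem (x : Int) (t t' : List Int) :
    x ∈ pvContrib t t' ↔
      ∃ s e os oe : Int, t = [s, e] ∧ t' = [os, oe] ∧ (s < oe ∨ e > os) ∧ x = min s os := by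
  rcases t with _ | ⟨s0, _ | ⟨e0, _ | ⟨z, t⟩⟩⟩ <;>
    rcases t' with _ | ⟨os0, _ | ⟨oe0, _ | ⟨z', t'⟩⟩⟩ <;>
    simp [pvContrib]

theorem pv_mem_candA (d : List (String × List (List Int))) (x : Int) :
    x ∈ pvCandA d ↔ ∃ p ∈ d, ∃ q ∈ d, p.1 ≠ q.1 ∧
      ∃ s e os oe : Int, [s, e] ∈ p.2 ∧ [os, oe] ∈ q.2 ∧ (s < oe ∨ e > os) ∧ x = min s os := by
  unfold pvCandA
  constructor
  · intro hx
    rw [List.mem_flatMap] at hx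
    obtain ⟨p, hp, hx⟩ := hx
    rw [List.mem_flatMap] at hx
    obtain ⟨q, hq, hx⟩ := hx
    by_cases hpq : p.1 = q.1
    · rw [if_pos hpq] at hx; simp at hx
    rw [if_neg hpq, List.mem_flatMap] at hx
    obtain ⟨t, ht, hx⟩ := hx
    rw [List.mem_flatMap] at hx
    obtain ⟨t', ht', hx⟩ := hx
    obtain ⟨s, e, os, oe, rfl, rfl, hc, rfl⟩ := (pv_contrib_mem x t t').mp hx
    exact ⟨p, hp, q, hq, hpq, s, e, os, oe, ht, ht', hc, rfl⟩
  · rintro ⟨p, hp, q, hq, hpq, s, e, os, oe, ht, ht', hc, rfl⟩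
    rw [List.mem_flatMap]
    refine ⟨p, hp, ?_⟩
    rw [List.mem_flatMap]
    refine ⟨q, hq, ?_⟩
    rw [if_neg hpq, List.mem_flatMap]
    refine ⟨[s, e], ht, ?_⟩
    rw [List.mem_flatMap]
    exact ⟨[os, oe], ht', (pv_contrib_mem _ _ _).mpr ⟨s, e, os, oe, rfl, rfl, hc, rfl⟩⟩

theorem pv_mem_candB (d : List (String × List (List Int))) (x : Int)
    (hPre : ∀ p ∈ d, ∀ t ∈ p.2, t.length = 2) :
    x ∈ pvCandB d ↔ ∃ p ∈ d, ∃ s e : Int, [s, e] ∈ p.2 ∧ x = s ∧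
      ∃ q ∈ d, q.1 ≠ p.1 ∧ ∃ os oe : Int, [os, oe] ∈ q.2 ∧ (s < oe ∨ e > os) := by
  unfold pvCandB
  constructor
  · intro hx
    rw [List.mem_flatMap] at hx
    obtain ⟨p, hp, hx⟩ := hx
    rw [List.mem_flatMap] at hx
    obtain ⟨t, ht, hx⟩ := hx
    obtain ⟨s, e, rfl⟩ := pv_pair_of_len2 t (hPre p hp t ht)
    have hg0 : PySem.List.pyGetD [s, e] 0 0 = s := rfl
    have hg1 : PySem.List.pyGetD [s, e] 1 0 = e := rfl
    simp only [hg0, hg1] at hx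
    by_cases hch : (pvStats d).any
        (fun q => q.1 != p.1 && (decide (q.2.1 > s) || decide (q.2.2 < e))) = true
    · rw [if_pos hch, List.mem_singleton] at hx
      subst hx
      obtain ⟨q, hq, hne1, os, oe, ht', hc⟩ := (pv_check_iff d hPre p.1 x e).mp hch
      exact ⟨p, hp, x, e, ht, rfl, q, hq, hne1, os, oe, ht', hc⟩
    · rw [if_neg hch] at hx; simp at hx
  · rintro ⟨p, hp, s, e, ht, hxs, q, hq, hne1, os, oe, ht', hc⟩
    subst hxs
    rw [List.mem_flatMap]
    refine ⟨p, hp, ?_⟩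
    rw [List.mem_flatMap]
    refine ⟨[x, e], ht, ?_⟩
    have hch := (pv_check_iff d hPre p.1 x e).mpr ⟨q, hq, hne1, os, oe, ht', hc⟩
    have hg0 : PySem.List.pyGetD [x, e] 0 0 = x := rfl
    have hg1 : PySem.List.pyGetD [x, e] 1 0 = e := rfl
    simp only [hg0, hg1]
    rw [if_pos hch]
    simp



theorem pv_A_small (d : List (String × List (List Int))) (h : d.length < 2) :
    first_double_enter_b_time d = 100000 := by
  rcases d with _ | ⟨p, _ | ⟨q, t⟩⟩
  · rfl
  · simp [first_double_enter_b_time]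
  · simp at h

-- ===== VERDICT (by name: the statement is the Claim_ definition above) =====
theorem first_double_enter_b_time_spec : Claim_equal_first_double_enter_b_time := by
  intro d _hDom hPre0
  unfold Spec_first_double_enter_b_time
  by_cases hlen : d.length < 2
  · rw [pv_A_small d hlen]
    unfold first_double_enter_b_time_alt
    rw [if_pos hlen]
  have hPre : ∀ p ∈ d, ∀ t ∈ p.2, t.length = 2 := by
    rcases hPre0 with h | h
    · exact absurd h hlen
    · exact h
  rw [pv_A_eq_candA, pv_B_eq_candB d hlen]
  apply Eq.symm
  apply pv_foldl_min_dom
  · -- every candA value dominates some candB value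
    intro x hx
    rw [pv_mem_candA d x] at hx
    obtain ⟨p, hp, q, hq, hne, s, e, os, oe, ht, ht', hc, hx⟩ := hx
    -- min s os is s or os; both participate (the partner condition is symmetric)
    rcases le_total s os with h | h
    · refine ⟨s, ?_, by omega⟩
      rw [pv_mem_candB d s hPre]
      exact ⟨p, hp, s, e, ht, rfl, q, hq, Ne.symm hne, os, oe, ht', hc⟩
    · refine ⟨os, ?_, by omega⟩
      rw [pv_mem_candB d os hPre]
      exact ⟨q, hq, os, oe, ht', rfl, p, hp, hne, s, e, ht, by omega⟩
  · -- every candB value dominates some candA value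
    intro x hx
    rw [pv_mem_candB d x hPre] at hx
    obtain ⟨p, hp, s, e, ht, hx, q, hq, hne, os, oe, ht', hc⟩ := hx
    refine ⟨min s os, ?_, by omega⟩
    rw [pv_mem_candA d _]
    exact ⟨p, hp, q, hq, Ne.symm hne, s, e, os, oe, ht, ht', hc, rfl⟩
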